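-- pv_equiv track=rewrite | github.com/orlandosaraivajr/dojo | 2018_JUN_13/dojo.py | sms
-- ===== SOURCE A (Python) =====
-- dic = {"A": "2", "B": "22", "C": "222",
--        "D": "3", "E": "33", "F": "333",
--        "G": "4", "H": "44", "I": "444",
--        "J": "5", "K": "55", "L": "555",
--        "M": "6", "N": "66", "O": "666",
--        "P": "7", "Q": "77", "R": "777", "S": "7777",
--        "T": "8", "U": "88", "V": "888",
--        "W": "9", "X": "99", "Y": "999", "Z": "9999",
--        " ": "0"}
--
-- def sms(msg):
--     response = ''
--     for index in range(len(msg)):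
--         if index > 0:
--             if test_char(msg[index - 1])[0] == test_char(msg[index])[0]:
--                 response += '_' + test_char(msg[index])
--             else:
--                 response += test_char(msg[index])
--         else:
--             response += test_char(msg[index])
--     return response
--
-- def test_char(char):
--     return dic[char.upper()]
-- ===== SOURCE B (Python) =====
-- def sms(msg):
--     # arithmetic multi-tap code: digit & tap count from the letter's alphabet index,
--     # no dictionary; output assembled by splitting codes into maximal same-digit runs
--     def code(ch):
--         ch = ch.upper()
--         if ch == ' ':
--             return '0'
--         k = ord(ch) - ord('A')
--         if not 0 <= k <= 25:
--             raise KeyError(ch)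
--         if k < 15:
--             digit, taps = 2 + k // 3, k % 3 + 1
--         elif k < 19:
--             digit, taps = 7, k - 14
--         elif k < 22:
--             digit, taps = 8, k - 18
--         else:
--             digit, taps = 9, k - 21
--         return str(digit) * taps
--     codes = [code(ch) for ch in msg]
--     out = []
--     i = 0
--     while i < len(codes):
--         j = i + 1
--         while j < len(codes) and codes[j][0] == codes[i][0]:
--             j += 1
--         out.append('_'.join(codes[i:j]))
--         i = j
--     return ''.join(out)
-- ===== Notes on version B (the rewrite author's own statement) =====
-- stated objective: alternative
-- what changed: B replaces the module dictionary by a closed-form arithmetic encoding (keypad digit and tap count computed from the letter's alphabet index) and assembles the output by splitting the code list into maximal same-digit runs joined with underscores, instead of A's dictionary lookups with a per-index comparison against the previous character; Pre_ excludes messages containing a character that is not an ASCII letter or space, on which A raises KeyError (and B also raises).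
import Mathlib
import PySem

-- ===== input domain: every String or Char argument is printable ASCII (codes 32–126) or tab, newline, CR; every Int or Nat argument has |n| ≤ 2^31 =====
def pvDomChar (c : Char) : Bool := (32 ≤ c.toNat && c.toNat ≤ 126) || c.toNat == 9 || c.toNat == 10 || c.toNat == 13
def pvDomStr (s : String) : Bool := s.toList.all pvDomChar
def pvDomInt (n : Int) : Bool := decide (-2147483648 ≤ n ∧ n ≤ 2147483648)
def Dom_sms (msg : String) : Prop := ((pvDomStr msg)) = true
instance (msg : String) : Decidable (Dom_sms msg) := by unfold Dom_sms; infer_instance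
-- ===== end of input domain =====

-- B replaces A's keypad dictionary by a closed-form arithmetic encoding (digit and
-- tap count from the letter's alphabet index) and assembles the output by splitting
-- the code list into maximal same-digit runs joined with '_'; objective: alternative.

-- ===== PORT A =====
-- shared module context: the module-level keypad dictionary; its lookup ('' only where
-- Python raises KeyError — those inputs are excluded by Pre_sms)
def dicGet (c : Char) : List Char :=
  match c with
  | 'A' => ['2'] | 'B' => ['2','2'] | 'C' => ['2','2','2']
  | 'D' => ['3'] | 'E' => ['3','3'] | 'F' => ['3','3','3']
  | 'G' => ['4'] | 'H' => ['4','4'] | 'I' => ['4','4','4']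
  | 'J' => ['5'] | 'K' => ['5','5'] | 'L' => ['5','5','5']
  | 'M' => ['6'] | 'N' => ['6','6'] | 'O' => ['6','6','6']
  | 'P' => ['7'] | 'Q' => ['7','7'] | 'R' => ['7','7','7'] | 'S' => ['7','7','7','7']
  | 'T' => ['8'] | 'U' => ['8','8'] | 'V' => ['8','8','8']
  | 'W' => ['9'] | 'X' => ['9','9'] | 'Y' => ['9','9','9'] | 'Z' => ['9','9','9','9']
  | ' ' => ['0']
  | _ => []

-- test_char(char): keypad code of char.upper()
def testChar (c : Char) : List Char := dicGet (PySem.Chars.upperChar c)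

-- A's loop over range(len(msg)), appending to 'response'
def smsChars (l : List Char) : List Char :=
  (List.range l.length).foldl (fun response index =>
    if 0 < index then
      if (testChar (l.getD (index - 1) ' ')).head? = (testChar (l.getD index ' ')).head? then
        response ++ '_' :: testChar (l.getD index ' ')
      else
        response ++ testChar (l.getD index ' ')
    else
      response ++ testChar (l.getD index ' ')) []

def sms (msg : String) : String := String.ofList (smsChars msg.toList)

-- ===== PORT B =====
-- Source B's code(ch): keypad digit and tap count computed arithmetically from the
-- alphabet index k = ord(upper) - 65 (value on non-letters other than ' ' is
-- irrelevant: Python raises KeyError there, excluded by Pre_sms)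
def codeB (c : Char) : List Char :=
  let u := PySem.Chars.upperChar c
  if u = ' ' then ['0']
  else
    let k := u.toNat - 65
    let dt : Nat × Nat :=
      if k < 15 then (2 + k / 3, k % 3 + 1)
      else if k < 19 then (7, k - 14)
      else if k < 22 then (8, k - 18)
      else (9, k - 21)
    List.replicate dt.2 (Char.ofNat (48 + dt.1))

-- the outer while loop of Source B: split codes into maximal runs sharing a first digit,
-- '_'-join each run (the inner while is the takeWhile/dropWhile split)
def runsB : List (List Char) → List (List Char)
  | [] => []
  | c :: rest =>
    PySem.Chars.join ['_'] (c :: rest.takeWhile (fun d => d.head? == c.head?)) ::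
      runsB (rest.dropWhile (fun d => d.head? == c.head?))
  termination_by cs => cs.length
  decreasing_by
    simpa using Nat.lt_succ_of_le (List.length_dropWhile_le _ _)

def sms_alt (msg : String) : String :=
  String.ofList (PySem.Chars.join [] (runsB (msg.toList.map codeB)))

-- ===== PRECONDITION & SPEC =====
-- Pre_sms: every character is an ASCII letter or a space — exactly the keypad keys
-- after uppercasing; on any other character Python A raises KeyError.
def Pre_sms (msg : String) : Prop :=
  (msg.toList.all (fun c => c.isAlpha || c == ' ')) = true
instance (msg : String) : Decidable (Pre_sms msg) := by unfold Pre_sms; infer_instance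

def pvWitness_sms : String := "Hi there"

def Spec_sms (msg : String) (out : String) : Prop := out = sms_alt msg
instance (msg : String) (out : String) : Decidable (Spec_sms msg out) := by unfold Spec_sms; infer_instance

-- ===== CLAIM (what is proved, stated in full; the proofs are below) =====
def Claim_equal_sms : Prop := ∀ (msg : String), Dom_sms msg → Pre_sms msg → Spec_sms msg (sms msg)

-- ===== LEMMAS AND PROOFS =====

-- on letters and the space, the arithmetic code agrees with the dictionary lookup
lemma codeB_eq_testChar (c : Char) (h : (c.isAlpha || c == ' ') = true) :
    codeB c = testChar c := by
  have hn : c.toNat = 32 ∨ (65 ≤ c.toNat ∧ c.toNat ≤ 90) ∨ (97 ≤ c.toNat ∧ c.toNat ≤ 122) := by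
    simp only [Bool.or_eq_true, beq_iff_eq] at h
    rcases h with h | h
    · simp only [Char.isAlpha, Char.isUpper, Char.isLower, Bool.or_eq_true,
        Bool.and_eq_true, decide_eq_true_eq] at h
      rcases h with ⟨h1, h2⟩ | ⟨h1, h2⟩
      · right; left
        exact ⟨h1, h2⟩
      · right; right
        exact ⟨h1, h2⟩
    · left; subst h; rfl
  have hc : c = Char.ofNat c.toNat := (Char.ofNat_toNat c).symm
  rw [hc]
  rcases hn with h | ⟨h1, h2⟩ | ⟨h1, h2⟩
  · rw [h]; decide
  · interval_cases h : c.toNat <;> decide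
  · interval_cases h : c.toNat <;> decide

-- canonical left-to-right form both ports are reduced to
def goC (p : List Char) : List (List Char) → List Char
  | [] => []
  | c :: rest => (if c.head? = p.head? then '_' :: c else c) ++ goC c rest

def fC : List (List Char) → List Char
  | [] => []
  | c :: rest => c ++ goC c rest

lemma goC_snoc (p : List Char) (cs : List (List Char)) (c : List Char) :
    goC p (cs ++ [c]) =
      goC p cs ++ (if c.head? = ((cs.getLast?).getD p).head? then '_' :: c else c) := by
  induction cs generalizing p with
  | nil => simp [goC]
  | cons a t ih =>
    simp only [List.cons_append, goC, ih a, List.append_assoc, List.getLast?_cons]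
    rcases t with _ | ⟨b, t'⟩ <;> simp

lemma fC_snoc (cs : List (List Char)) (c : List Char) (h : cs ≠ []) :
    fC (cs ++ [c]) =
      fC cs ++ (if c.head? = ((cs.getLast?).getD []).head? then '_' :: c else c) := by
  rcases cs with _ | ⟨a, t⟩
  · exact absurd rfl h
  · simp only [List.cons_append, fC, goC_snoc a t c, List.append_assoc, List.getLast?_cons]
    rcases t with _ | ⟨b, t'⟩ <;> simp

lemma smsChars_eq_fC (l : List Char) : smsChars l = fC (l.map testChar) := by
  induction l using List.reverseRecOn with
  | nil => simp [smsChars, fC]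
  | append_singleton l' x ih =>
    have hpref : (List.range l'.length).foldl (fun response index =>
        if 0 < index then
          if (testChar ((l' ++ [x]).getD (index - 1) ' ')).head? =
              (testChar ((l' ++ [x]).getD index ' ')).head? then
            response ++ '_' :: testChar ((l' ++ [x]).getD index ' ')
          else
            response ++ testChar ((l' ++ [x]).getD index ' ')
        else
          response ++ testChar ((l' ++ [x]).getD index ' ')) [] = smsChars l' := by
      unfold smsChars
      apply PySem.List.foldl_congr_mem
      intro acc i hi
      have hi' : i < l'.length := List.mem_range.mp hi
      have h1 : (l' ++ [x]).getD i ' ' = l'.getD i ' ' := by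
        simp [List.getD, List.getElem?_append_left hi']
      have h2 : (l' ++ [x]).getD (i - 1) ' ' = l'.getD (i - 1) ' ' := by
        have : i - 1 < l'.length := lt_of_le_of_lt (Nat.sub_le i 1) hi'
        simp [List.getD, List.getElem?_append_left this]
      rw [h1, h2]
    have hcongr : smsChars (l' ++ [x]) =
        (if 0 < l'.length then
          if (testChar ((l' ++ [x]).getD (l'.length - 1) ' ')).head? =
              (testChar ((l' ++ [x]).getD l'.length ' ')).head? then
            smsChars l' ++ '_' :: testChar ((l' ++ [x]).getD l'.length ' ')
          else
            smsChars l' ++ testChar ((l' ++ [x]).getD l'.length ' ')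
        else
          smsChars l' ++ testChar ((l' ++ [x]).getD l'.length ' ')) := by
      conv_lhs => rw [smsChars]
      simp only [List.length_append, List.length_singleton, List.range_succ,
        List.foldl_append, List.foldl_cons, List.foldl_nil]
      rw [hpref]
    rw [hcongr]
    have hx : (l' ++ [x]).getD l'.length ' ' = x := by
      simp [List.getD]
    rcases l' with _ | ⟨a, t⟩
    · simp [smsChars, fC, goC]
    · have hne : (a :: t) ≠ ([] : List Char) := by simp
      have hlast : (a :: t ++ [x]).getD ((a :: t).length - 1) ' ' = (a :: t).getLast hne := by
        simp only [List.getD]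
        rw [List.getElem?_append_left (by simp)]
        simp [List.getLast_eq_getElem]
        rfl
      have hmapne : ((a :: t).map testChar) ≠ [] := by simp
      rw [List.map_append, List.map_singleton,
        fC_snoc ((a :: t).map testChar) (testChar x) hmapne, ih]
      have hgl : (((a :: t).map testChar).getLast?).getD [] =
          testChar ((a :: t).getLast hne) := by
        rw [List.getLast?_map, List.getLast?_eq_some_getLast hne]
        simp
      have hpos : 0 < (a :: t).length := by simp
      simp only [hgl, hx, hlast, if_pos hpos]
      by_cases hh : (testChar ((a :: t).getLast hne)).head? = (testChar x).head?
      · rw [if_pos hh, if_pos hh.symm]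
      · rw [if_neg hh, if_neg (fun e => hh e.symm)]

lemma join_cons (r : List Char) (rs : List (List Char)) :
    PySem.Chars.join [] (r :: rs) = r ++ PySem.Chars.join [] rs := by
  rcases rs with _ | ⟨s, rs'⟩
  · simp [PySem.Chars.join, List.intercalate]
  · simpa using PySem.Chars.join_cons_cons [] r s rs'

lemma join_us (c : List Char) (same : List (List Char)) :
    PySem.Chars.join ['_'] (c :: same) = c ++ (same.map ('_' :: ·)).flatten := by
  induction same generalizing c with
  | nil => simp [PySem.Chars.join, List.intercalate]
  | cons d t ih =>
    rw [PySem.Chars.join_cons_cons, ih d]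
    simp

lemma goC_split (p : List Char) (rest : List (List Char)) :
    goC p rest =
      ((rest.takeWhile (fun d => d.head? == p.head?)).map ('_' :: ·)).flatten ++
        fC (rest.dropWhile (fun d => d.head? == p.head?)) := by
  induction rest generalizing p with
  | nil => simp [goC, fC]
  | cons d t ih =>
    by_cases h : d.head? = p.head?
    · have hfun : (fun x : List Char => x.head? == d.head?) =
          (fun x : List Char => x.head? == p.head?) := by
        funext x; rw [h]
      have ht : List.takeWhile (fun d => d.head? == p.head?) (d :: t) =
          d :: List.takeWhile (fun d => d.head? == p.head?) t := by
        simp [h]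
      have hd : List.dropWhile (fun d => d.head? == p.head?) (d :: t) =
          List.dropWhile (fun d => d.head? == p.head?) t := by
        simp [h]
      rw [goC, if_pos h, ht, hd, ih d, hfun]
      simp
    · have ht : List.takeWhile (fun d => d.head? == p.head?) (d :: t) = [] := by
        simp [h]
      have hd : List.dropWhile (fun d => d.head? == p.head?) (d :: t) = d :: t := by
        simp [h]
      rw [goC, if_neg h, ht, hd]
      simp [fC]

lemma runsB_join (cs : List (List Char)) :
    PySem.Chars.join [] (runsB cs) = fC cs := by
  induction cs using runsB.induct with
  | case1 => simp [runsB, PySem.Chars.join, List.intercalate, fC]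
  | case2 c rest ih =>
    rw [runsB, join_cons, ih, join_us, fC, goC_split c rest, List.append_assoc]

-- ===== VERDICT (by name: the statement is the Claim_ definition above) =====
theorem sms_spec : Claim_equal_sms := by
  intro msg _ hpre
  unfold Spec_sms sms sms_alt
  have hmap : msg.toList.map codeB = msg.toList.map testChar := by
    apply List.map_congr_left
    intro c hc
    exact codeB_eq_testChar c (List.all_eq_true.mp hpre c hc)
  rw [hmap, smsChars_eq_fC, runsB_join]
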